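-- pv_equiv track=rewrite | github.com/qsjl11/dieloli | script/Design/MapHandle.py | judgeSceneAffiliation
-- ===== SOURCE A (Python) =====
-- def judgeSceneAffiliation(nowScenePath:list,targetScenePath:list) -> str:
--     '''
--     判断场景有无所属关系
--     当前场景属于目标场景的子场景 -> 返回'subordinate'
--     当前场景与目标场景的第一个上级场景相同 -> 返回'common'
--     other -> 返回'nobelonged'
--     Keyword arguments:
--     nowScenePath -- 当前场景路径
--     targetScenePath -- 目标场景路径
--     '''
--     if nowScenePath[:-1] != targetScenePath[:-1]:
--         if nowScenePath[:-1] != targetScenePath: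
--             if nowScenePath[:-1] != []:
--                 return judgeSceneAffiliation(nowScenePath[:-1],targetScenePath)
--             else:
--                 return 'nobelonged'
--         else:
--             return 'subordinate'
--     return 'common'
-- ===== SOURCE B (Python) =====
-- def judgeSceneAffiliation(nowScenePath: list, targetScenePath: list) -> str:
--     n, t = nowScenePath, targetScenePath
--     if t and len(t) < len(n) and n[:len(t)] == t:
--         return 'subordinate'
--     p = t[:-1]
--     if len(p) <= max(len(n) - 1, 0) and n[:len(p)] == p:
--         return 'common'
--     return 'nobelonged'
-- ===== Notes on version B (the rewrite author's own statement) =====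
-- stated objective: faster
-- what changed: Replaced A's recursive truncation (repeatedly slicing nowScenePath[:-1] and comparing full prefixes at each level) with two direct prefix comparisons: t is a proper prefix of n gives 'subordinate', otherwise t[:-1] being a prefix of n (within n's parent) gives 'common', else 'nobelonged'.
import Mathlib
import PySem

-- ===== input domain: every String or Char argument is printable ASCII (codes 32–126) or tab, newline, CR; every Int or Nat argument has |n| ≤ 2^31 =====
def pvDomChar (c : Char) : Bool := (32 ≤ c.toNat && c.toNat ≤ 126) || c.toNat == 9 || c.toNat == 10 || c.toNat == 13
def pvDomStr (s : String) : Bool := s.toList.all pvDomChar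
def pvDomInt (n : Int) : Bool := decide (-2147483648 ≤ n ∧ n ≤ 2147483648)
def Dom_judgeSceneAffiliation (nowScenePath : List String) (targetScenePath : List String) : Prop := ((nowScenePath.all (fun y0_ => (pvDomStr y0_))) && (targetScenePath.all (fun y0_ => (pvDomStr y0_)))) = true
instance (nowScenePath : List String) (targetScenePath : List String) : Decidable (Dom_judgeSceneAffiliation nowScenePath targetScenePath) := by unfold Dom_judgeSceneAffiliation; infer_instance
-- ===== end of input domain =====

-- B replaces A's recursive truncation (repeated slicing, O(n^2)) by two direct prefix
-- comparisons (O(n)); same return value on every input (both are total).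

-- ===== PORT A =====
-- literal transliteration of A: nested ifs on slices n[:-1], recursion on n[:-1]
def judgeSceneAffiliation (nowScenePath : List String) (targetScenePath : List String) : String :=
  if PySem.List.slice nowScenePath none (some (-1)) ≠ PySem.List.slice targetScenePath none (some (-1)) then
    if PySem.List.slice nowScenePath none (some (-1)) ≠ targetScenePath then
      if PySem.List.slice nowScenePath none (some (-1)) ≠ ([] : List String) then
        judgeSceneAffiliation (PySem.List.slice nowScenePath none (some (-1))) targetScenePath
      else "nobelonged"
    else "subordinate"
  else "common"
termination_by nowScenePath.length
decreasing_by
  rename_i _ _ h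
  rw [PySem.List.slice_to_neg_one] at h ⊢
  have := List.length_pos_of_ne_nil h
  simp only [List.length_dropLast] at this ⊢
  omega

-- ===== PORT B =====
-- literal transliteration of Source B: two prefix tests (n[:len(t)] -> take; t[:-1] -> dropLast;
-- Python's max(len(n)-1, 0) is Nat truncated subtraction n.length - 1 here)
def judgeSceneAffiliation_alt (nowScenePath : List String) (targetScenePath : List String) : String :=
  if targetScenePath ≠ [] ∧ targetScenePath.length < nowScenePath.length ∧
      nowScenePath.take targetScenePath.length = targetScenePath then "subordinate"
  else
    let p := targetScenePath.dropLast
    if p.length ≤ nowScenePath.length - 1 ∧ nowScenePath.take p.length = p then "common"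
    else "nobelonged"

-- ===== PRECONDITION & SPEC =====
def Spec_judgeSceneAffiliation (nowScenePath : List String) (targetScenePath : List String) (out : String) : Prop := out = judgeSceneAffiliation_alt nowScenePath targetScenePath
instance (nowScenePath : List String) (targetScenePath : List String) (out : String) : Decidable (Spec_judgeSceneAffiliation nowScenePath targetScenePath out) := by unfold Spec_judgeSceneAffiliation; infer_instance

-- ===== CLAIM (what is proved, stated in full; the proofs are below) =====
def Claim_equal_judgeSceneAffiliation : Prop := ∀ (nowScenePath : List String) (targetScenePath : List String), Dom_judgeSceneAffiliation nowScenePath targetScenePath → Spec_judgeSceneAffiliation nowScenePath targetScenePath (judgeSceneAffiliation nowScenePath targetScenePath)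

-- ===== LEMMAS AND PROOFS =====

-- one unfolding step of A, with slices rewritten to dropLast
theorem judgeSceneAffiliation_eq (n t : List String) :
    judgeSceneAffiliation n t =
      if n.dropLast ≠ t.dropLast then
        if n.dropLast ≠ t then
          if n.dropLast ≠ ([] : List String) then
            judgeSceneAffiliation n.dropLast t
          else "nobelonged"
        else "subordinate"
      else "common" := by
  rw [judgeSceneAffiliation]
  simp only [PySem.List.slice_to_neg_one]

-- B after one "snoc" step of n: exactly the case analysis A performs
theorem alt_snoc (xs : List String) (x : String) (t : List String) :
    judgeSceneAffiliation_alt (xs ++ [x]) t =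
      if xs ≠ t.dropLast then
        if xs ≠ t then
          if xs ≠ ([] : List String) then judgeSceneAffiliation_alt xs t
          else "nobelonged"
        else "subordinate"
      else "common" := by
  by_cases h1 : xs = t.dropLast
  · rw [if_neg (by simp [h1])]
    subst h1
    simp only [judgeSceneAffiliation_alt]
    rw [if_neg, if_pos]
    · exact ⟨by simp, by simp⟩
    · rintro ⟨ht, hlt, -⟩
      have := List.length_pos_of_ne_nil ht
      simp only [List.length_append, List.length_dropLast, List.length_cons,
        List.length_nil] at hlt
      omega
  · rw [if_pos h1]
    by_cases h2 : xs = t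
    · rw [if_neg (by simp [h2])]
      subst h2
      have ht : xs ≠ [] := by rintro rfl; exact h1 rfl
      simp only [judgeSceneAffiliation_alt]
      rw [if_pos]
      exact ⟨ht, by simp, by simp⟩
    · rw [if_pos h2]
      by_cases h3 : xs = []
      · rw [if_neg (by simp [h3])]
        subst h3
        have hm : 2 ≤ t.length := by
          rcases t with _ | ⟨a, _ | ⟨b, t⟩⟩ <;> simp_all
        simp only [judgeSceneAffiliation_alt]
        rw [if_neg, if_neg]
        · rintro ⟨hle, -⟩
          simp only [List.length_dropLast, List.nil_append, List.length_cons,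
            List.length_nil] at hle
          omega
        · rintro ⟨-, hlt, -⟩
          simp only [List.nil_append, List.length_cons, List.length_nil] at hlt
          omega
      · rw [if_pos h3]
        have hL : 0 < xs.length := List.length_pos_of_ne_nil h3
        simp only [judgeSceneAffiliation_alt, List.length_append, List.length_cons, List.length_nil]
        have key1 : (t ≠ [] ∧ t.length < xs.length + (0 + 1) ∧ (xs ++ [x]).take t.length = t)
            ↔ (t ≠ [] ∧ t.length < xs.length ∧ xs.take t.length = t) := by
          constructor
          · rintro ⟨ht, hlt, htk⟩
            rcases Nat.lt_or_ge t.length xs.length with h | h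
            · exact ⟨ht, h, by rwa [List.take_append_of_le_length (Nat.le_of_lt h)] at htk⟩
            · have hEq : t.length = xs.length := by omega
              rw [hEq] at htk
              rw [List.take_left] at htk
              exact absurd htk h2
          · rintro ⟨ht, hlt, htk⟩
            exact ⟨ht, by omega, by rwa [List.take_append_of_le_length (Nat.le_of_lt hlt)]⟩
        have key2 : (t.dropLast.length ≤ xs.length + (0 + 1) - 1 ∧ (xs ++ [x]).take t.dropLast.length = t.dropLast)
            ↔ (t.dropLast.length ≤ xs.length - 1 ∧ xs.take t.dropLast.length = t.dropLast) := by
          constructor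
          · rintro ⟨hle, htk⟩
            rcases Nat.lt_or_ge t.dropLast.length xs.length with h | h
            · exact ⟨by omega, by rwa [List.take_append_of_le_length (Nat.le_of_lt h)] at htk⟩
            · have hEq : t.dropLast.length = xs.length := by omega
              rw [hEq, List.take_left] at htk
              exact absurd htk h1
          · rintro ⟨hle, htk⟩
            exact ⟨by omega, by rwa [List.take_append_of_le_length (by omega)]⟩
        rw [if_congr key1 rfl rfl, if_congr key2 rfl rfl]

theorem a_eq_b : ∀ (n t : List String),
    judgeSceneAffiliation n t = judgeSceneAffiliation_alt n t := by
  intro n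
  induction n using List.reverseRecOn with
  | nil =>
      intro t
      rw [judgeSceneAffiliation_eq]
      simp only [List.dropLast_nil]
      by_cases h : t.dropLast = []
      · rw [if_neg (by simp [h])]
        simp [judgeSceneAffiliation_alt, h]
      · rw [if_pos (by simp [Ne, eq_comm, h]), if_pos, if_neg (by simp)]
        · have hl := List.length_pos_of_ne_nil h
          have ht : t ≠ [] := by rintro rfl; simp at h
          simp only [judgeSceneAffiliation_alt]
          rw [if_neg (by rintro ⟨-, hlt, -⟩; simp at hlt), if_neg]
          rintro ⟨hle, -⟩
          simp only [List.length_dropLast, List.length_nil] at hle hl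
          omega
        · rintro rfl
          simp at h
  | append_singleton xs x ih =>
      intro t
      rw [judgeSceneAffiliation_eq, alt_snoc]
      simp only [List.dropLast_concat]
      split_ifs with h1 h2 h3 <;> simp [ih]

-- ===== VERDICT (by name: the statement is the Claim_ definition above) =====
theorem judgeSceneAffiliation_spec : Claim_equal_judgeSceneAffiliation := by
  intro n t _
  unfold Spec_judgeSceneAffiliation
  exact a_eq_b n t
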